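-- pv_equiv track=rewrite | github.com/clay-arras/cp-practice | contests/usaco/2026-jan-bronze/c/main.py | solve
-- ===== SOURCE A (Python) =====
-- from math import inf
-- from collections import defaultdict
--
-- def solve(N, K, Q, arr):
--     grid = defaultdict(int)
--     ans = [0] * Q
--     prev_max = -inf
--
--     for idx, (r, c, v) in enumerate(arr):
--         r -= 1
--         c -= 1
--         grid[(r, c)] = v
--
--         dim = 2 * K - 1
--         fr = r - (K - 1)
--         fc = c - (K - 1)
--         pref = [[0] * (dim + 1) for _ in range(dim + 1)]
--
--         for i in range(1, dim + 1):
--             for j in range(1, dim + 1):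
--                 pref[i][j] = (
--                     grid[(fr + i - 1, fc + j - 1)]
--                     + pref[i - 1][j]
--                     + pref[i][j - 1]
--                     - pref[i - 1][j - 1]
--                 )
--
--         for i in range(K):
--             for j in range(K):
--                 curr = pref[i + K][j + K] + pref[i][j] - pref[i][j + K] - pref[i + K][j]
--                 prev_max = max(prev_max, curr)
--         ans[idx] = prev_max
--
--     return ans
-- ===== SOURCE B (Python) =====
-- def solve(N, K, Q, arr):
--     grid = {}
--     ans = [0] * Q
--     prev_max = None  # None stands for "no window seen yet"
--
--     for idx, (r, c, v) in enumerate(arr):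
--         r -= 1
--         c -= 1
--         grid[(r, c)] = v
--
--         fr = r - (K - 1)
--         fc = c - (K - 1)
--         width = 2 * K - 1
--
--         # column sums of the K rows starting at fr, over the (2K-1)-wide band
--         colsum = [sum(grid.get((fr + a, fc + j), 0) for a in range(K))
--                   for j in range(width)]
--         for i in range(K):
--             if i > 0:
--                 # slide the K-row column sums one row down
--                 for j in range(width):
--                     colsum[j] += grid.get((fr + i + K - 1, fc + j), 0) \
--                                - grid.get((fr + i - 1, fc + j), 0)
--             s = sum(colsum[j] for j in range(K))
--             prev_max = s if prev_max is None else max(prev_max, s)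
--             for j in range(1, K):
--                 s += colsum[j + K - 1] - colsum[j - 1]
--                 prev_max = max(prev_max, s)
--         ans[idx] = prev_max
--
--     return ans
-- ===== Notes on version B (the rewrite author's own statement) =====
-- stated objective: alternative
-- what changed: Replaces A's per-query (2K)x(2K) inclusion-exclusion prefix-sum table with a 2D sliding window: column sums of K rows slid vertically and a width-K running sum slid horizontally, folding each window total into the running max.
-- outside the precondition, e.g. on solve(5, 0, 1, [(1, 1, 2)]): A returns [-inf], B returns [None]
import Mathlib
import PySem

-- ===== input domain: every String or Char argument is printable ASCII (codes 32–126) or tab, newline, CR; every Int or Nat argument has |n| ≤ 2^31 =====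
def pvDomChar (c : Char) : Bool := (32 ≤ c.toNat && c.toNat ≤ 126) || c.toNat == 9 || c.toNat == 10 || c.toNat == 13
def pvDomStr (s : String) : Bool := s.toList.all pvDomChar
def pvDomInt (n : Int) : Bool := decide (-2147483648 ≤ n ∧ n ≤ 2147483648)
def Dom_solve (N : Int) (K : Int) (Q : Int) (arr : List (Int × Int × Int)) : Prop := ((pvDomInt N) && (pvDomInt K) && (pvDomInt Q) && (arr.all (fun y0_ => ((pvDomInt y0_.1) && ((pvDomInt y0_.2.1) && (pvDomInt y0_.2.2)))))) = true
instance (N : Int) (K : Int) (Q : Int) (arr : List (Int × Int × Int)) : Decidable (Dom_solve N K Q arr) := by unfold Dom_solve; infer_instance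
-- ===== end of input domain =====

-- B replaces A's per-query (2K)×(2K) inclusion–exclusion prefix table with a 2D sliding
-- window (vertically slid column sums, horizontally slid width-K running sum): a
-- genuinely different algorithm of the same O(K^2)-per-query cost (no prefix table).
-- Equivalence is about the RETURN value (A also mutates its defaultdict by reading
-- missing keys, which no caller observes here).

-- ===== PORT A =====
-- running max; `none` plays the role of A's -inf seed (max(-inf, x) = x)
def optMaxA (p : Option Int) (x : Int) : Option Int :=
  match p with
  | none => some x
  | some m => some (max m x)

-- inner j-loop of A's prefix-table build: produces the entries pref[i][1..dim] in order,
-- `cur` is pref[i][j] of the previous step (row built left to right, same reads, same values)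
def rowGoA (fi : Nat → Int) (prev : List Int) : Nat → Nat → Int → List Int
  | 0, _, _ => []
  | n+1, j, cur =>
    let v := fi j + prev.getD (j+1) 0 + cur - prev.getD j 0
    v :: rowGoA fi prev n (j+1) v

def rowA (fi : Nat → Int) (prev : List Int) (dim : Nat) : List Int :=
  0 :: rowGoA fi prev dim 0 0

-- outer i-loop of the prefix-table build: each row is computed from the previous one
def prefRowsA (f2 : Nat → Nat → Int) (dim : Nat) : Nat → List Int → Nat → List (List Int)
  | _, _, 0 => []
  | i, prev, n+1 =>
    let r := rowA (f2 i) prev dim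
    r :: prefRowsA f2 dim (i+1) r n

def prefA (f2 : Nat → Nat → Int) (dim : Nat) : List (List Int) :=
  (List.replicate (dim+1) 0) :: prefRowsA f2 dim 0 (List.replicate (dim+1) 0) dim

def get2A (p : List (List Int)) (i j : Nat) : Int := (p.getD i []).getD j 0

-- one query of A: rebuild the prefix table around (r, c) and fold all K×K windows into prev
def stepA (K : Int) (g : PySem.Dict (Int × Int) Int) (r c : Int) (prev : Option Int) : Option Int :=
  let dim : Nat := (2*K - 1).toNat
  let fr := r - (K - 1)
  let fc := c - (K - 1)
  let f2 : Nat → Nat → Int := fun a b => g.getD (fr + (a : Int), fc + (b : Int)) 0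
  let pref := prefA f2 dim
  let Kn := K.toNat
  (List.range Kn).foldl (fun p i =>
    (List.range Kn).foldl (fun p j =>
      optMaxA p (get2A pref (i+Kn) (j+Kn) + get2A pref i j
                 - get2A pref i (j+Kn) - get2A pref (i+Kn) j)) p) prev

-- enumerate(arr) loop of A; `g.getD _ 0` is A's defaultdict(int) read
def solveGoA (K : Int) : List (Int × Int × Int) → Nat → PySem.Dict (Int × Int) Int → Option Int → List Int → List Int
  | [], _, _, _, ans => ans
  | (r, c, v) :: rest, idx, g, prev, ans =>
    let r := r - 1
    let c := c - 1
    let g := g.insert (r, c) v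
    let prev := stepA K g r c prev
    -- ans[idx] = prev_max; within Pre_ prev is `some` here, so getD 0 never fires
    solveGoA K rest (idx+1) g prev (ans.set idx (prev.getD 0))

def solve (N : Int) (K : Int) (Q : Int) (arr : List (Int × Int × Int)) : List Int :=
  solveGoA K arr 0 PySem.Dict.empty none (List.replicate Q.toNat 0)

-- ===== PORT B =====
-- running max; `None` of Source B
def optMaxB (p : Option Int) (s : Int) : Option Int :=
  match p with
  | none => some s
  | some m => some (max m s)

-- colsum = [sum(grid.get((fr+a, fc+j), 0) for a in range(K)) for j in range(width)]
def colsum0B (g : PySem.Dict (Int × Int) Int) (fr fc : Int) (K : Int) (width : Nat) : List Int :=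
  (List.range width).map (fun (j : Nat) =>
    (List.range K.toNat).foldl (fun (s : Int) (a : Nat) => s + g.getD (fr + (a : Int), fc + (j : Int)) 0) 0)

-- for j in range(width): colsum[j] += grid.get(...) - grid.get(...)
def slideColB (g : PySem.Dict (Int × Int) Int) (fr fc : Int) (K : Int) (i : Nat) (colsum : List Int) (width : Nat) : List Int :=
  (List.range width).map (fun (j : Nat) =>
    colsum.getD j 0 + g.getD (fr + ((i : Int) + K - 1), fc + (j : Int)) 0
                    - g.getD (fr + ((i : Int) - 1), fc + (j : Int)) 0)

-- s = sum(colsum[j] for j in range(K)); then slide the width-K window over the columns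
def rowMaxB (colsum : List Int) (Kn : Nat) (prev : Option Int) : Option Int :=
  let s := (List.range Kn).foldl (fun s j => s + colsum.getD j 0) 0
  let p := optMaxB prev s
  ((List.range (Kn - 1)).foldl (fun (sp : Int × Option Int) t =>
      let j := t + 1
      let s' := sp.1 + colsum.getD (j + Kn - 1) 0 - colsum.getD (j - 1) 0
      (s', optMaxB sp.2 s')) (s, p)).2

-- one query of B: for i in range(K): (slide colsums down if i > 0, then scan the row of windows)
def stepB (K : Int) (g : PySem.Dict (Int × Int) Int) (r c : Int) (prev : Option Int) : Option Int :=
  let fr := r - (K - 1)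
  let fc := c - (K - 1)
  let width : Nat := (2*K - 1).toNat
  let Kn := K.toNat
  ((List.range Kn).foldl (fun (st : List Int × Option Int) i =>
      let colsum := if i = 0 then st.1 else slideColB g fr fc K i st.1 width
      (colsum, rowMaxB colsum Kn st.2))
    (colsum0B g fr fc K width, prev)).2

def solveGoB (K : Int) : List (Int × Int × Int) → Nat → PySem.Dict (Int × Int) Int → Option Int → List Int → List Int
  | [], _, _, _, ans => ans
  | (r, c, v) :: rest, idx, g, prev, ans =>
    let r := r - 1
    let c := c - 1
    let g := g.insert (r, c) v
    let prev := stepB K g r c prev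
    -- ans[idx] = prev_max; within Pre_ prev is `some` here
    solveGoB K rest (idx+1) g prev (ans.set idx (prev.getD 0))

def solve_alt (N : Int) (K : Int) (Q : Int) (arr : List (Int × Int × Int)) : List Int :=
  solveGoB K arr 0 PySem.Dict.empty none (List.replicate Q.toNat 0)

-- ===== PRECONDITION & SPEC =====
-- Pre_ excludes (a) K ≤ 0 with a nonempty arr, where A's running max stays -inf and A
-- returns floats (not ints; B returns None there), and (b) len(arr) > Q, where both
-- programs raise IndexError on ans[idx].
def Pre_solve (N : Int) (K : Int) (Q : Int) (arr : List (Int × Int × Int)) : Prop :=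
  (1 ≤ K ∨ arr = []) ∧ (arr.length : Int) ≤ Q

instance (N : Int) (K : Int) (Q : Int) (arr : List (Int × Int × Int)) : Decidable (Pre_solve N K Q arr) := by
  unfold Pre_solve; infer_instance

def pvWitness_solve : Int × Int × Int × (List (Int × Int × Int)) := (3, 2, 2, [(1, 1, 5), (2, 2, -3)])

def Spec_solve (N : Int) (K : Int) (Q : Int) (arr : List (Int × Int × Int)) (out : List Int) : Prop := out = solve_alt N K Q arr
instance (N : Int) (K : Int) (Q : Int) (arr : List (Int × Int × Int)) (out : List Int) : Decidable (Spec_solve N K Q arr out) := by unfold Spec_solve; infer_instance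

-- ===== CLAIM (what is proved, stated in full; the proofs are below) =====
def Claim_equal_solve : Prop := ∀ (N : Int) (K : Int) (Q : Int) (arr : List (Int × Int × Int)), Dom_solve N K Q arr → Pre_solve N K Q arr → Spec_solve N K Q arr (solve N K Q arr)

-- ===== LEMMAS AND PROOFS =====

-- Σ_{t < n} f t, as the structural recursion both loop proofs use
def colS (f : Nat → Int) : Nat → Int
  | 0 => 0
  | n+1 => colS f n + f n

theorem colS_congr (f g : Nat → Int) (n : Nat) (h : ∀ t, t < n → f t = g t) :
    colS f n = colS g n := by
  induction n with
  | zero => rfl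
  | succ n ih => simp [colS, ih (fun t ht => h t (by omega)), h n (by omega)]

theorem colS_add (f : Nat → Int) (m n : Nat) :
    colS f (m + n) = colS f m + colS (fun x => f (m + x)) n := by
  induction n with
  | zero => simp [colS]
  | succ n ih =>
    have e : m + (n + 1) = (m + n) + 1 := by omega
    rw [e]; simp [colS, ih]; ring

theorem colS_add_distrib (p q : Nat → Int) (n : Nat) :
    colS (fun x => p x + q x) n = colS p n + colS q n := by
  induction n with
  | zero => rfl
  | succ n ih => simp [colS, ih]; ring

theorem colS_zero (n : Nat) : colS (fun _ => (0 : Int)) n = 0 := by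
  induction n with
  | zero => rfl
  | succ n ih => simp [colS, ih]

theorem colS_shift (f : Nat → Int) (n : Nat) :
    colS (fun a => f (a + 1)) n = colS f n + f n - f 0 := by
  induction n with
  | zero => simp [colS]
  | succ n ih => simp [colS, ih]; ring

theorem colS_comm (h : Nat → Nat → Int) (m n : Nat) :
    colS (fun a => colS (fun b => h a b) n) m = colS (fun b => colS (fun a => h a b) m) n := by
  induction m with
  | zero =>
    show (0 : Int) = _
    exact ((colS_congr _ (fun _ => (0 : Int)) n (fun b _ => rfl)).trans (colS_zero n)).symm
  | succ m ih => simp [colS, ih, colS_add_distrib]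

-- 2D partial sums S i j = Σ_{a<i} Σ_{b<j} f2 a b  (what A's pref[i][j] holds)
def Ssum (f2 : Nat → Nat → Int) (i j : Nat) : Int := colS (fun a => colS (f2 a) j) i

-- column sum of K cells below row i, and the K×K window sum with top-left (i, j),
-- written the way B computes it (sum of K column sums)
def Ccol (f2 : Nat → Nat → Int) (K i j : Nat) : Int := colS (fun a => f2 (i + a) j) K

def Wrow (f2 : Nat → Nat → Int) (K i j : Nat) : Int := colS (fun b => Ccol f2 K i (j + b)) K

-- target values of A's row build
def Rrow (fi Sp : Nat → Int) : Nat → Int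
  | 0 => 0
  | t+1 => fi t + Sp (t+1) + Rrow fi Sp t - Sp t

theorem rowGoA_spec (fi : Nat → Int) (prev : List Int) (Sp : Nat → Int) :
    ∀ (n j : Nat), (∀ t, t ≤ j + n → prev.getD t 0 = Sp t) →
      rowGoA fi prev n j (Rrow fi Sp j) = (List.range n).map (fun t => Rrow fi Sp (j+t+1)) := by
  intro n
  induction n with
  | zero => intro j _; rfl
  | succ n ih =>
    intro j h
    have hv : fi j + prev.getD (j+1) 0 + Rrow fi Sp j - prev.getD j 0 = Rrow fi Sp (j+1) := by
      rw [h (j+1) (by omega), h j (by omega)]; rfl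
    simp only [rowGoA, hv]
    rw [ih (j+1) (fun t ht => h t (by omega))]
    rw [List.range_succ_eq_map]
    simp only [List.map_cons, List.map_map]
    refine congrArg₂ List.cons (by simp) ?_
    refine (List.map_congr_left ?_).symm
    intro t _
    simp only [Function.comp]
    have e : j + (t + 1) + 1 = j + 1 + t + 1 := by omega
    rw [e]

theorem Rrow_eq_Ssum (f2 : Nat → Nat → Int) (i : Nat) :
    ∀ t, Rrow (f2 i) (fun t => Ssum f2 i t) t = Ssum f2 (i+1) t := by
  intro t
  induction t with
  | zero =>
    show (0 : Int) = Ssum f2 (i+1) 0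
    rw [Ssum]
    exact ((colS_congr (fun a => colS (f2 a) 0) (fun _ => (0 : Int)) (i+1) (fun a _ => rfl)).trans
      (colS_zero _)).symm
  | succ t ih =>
    show f2 i t + Ssum f2 i (t+1) + Rrow (f2 i) (fun t => Ssum f2 i t) t - Ssum f2 i t
        = Ssum f2 (i+1) (t+1)
    rw [ih]
    simp only [Ssum]
    rw [colS_congr (fun a => colS (f2 a) (t+1)) (fun a => colS (f2 a) t + f2 a t) i (fun a _ => rfl),
        colS_congr (fun a => colS (f2 a) (t+1)) (fun a => colS (f2 a) t + f2 a t) (i+1) (fun a _ => rfl)]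
    simp only [colS_add_distrib, colS]
    ring

theorem rowA_getD (fi : Nat → Int) (prev : List Int) (Sp : Nat → Int) (dim : Nat)
    (h : ∀ t, t ≤ dim → prev.getD t 0 = Sp t) :
    ∀ t, t ≤ dim → (rowA fi prev dim).getD t 0 = Rrow fi Sp t := by
  intro t ht
  have hrow := rowGoA_spec fi prev Sp dim 0 (fun t ht' => h t (by omega))
  match t with
  | 0 => rfl
  | t+1 =>
    show (rowGoA fi prev dim 0 0).getD t 0 = _
    have : rowGoA fi prev dim 0 0 = rowGoA fi prev dim 0 (Rrow fi Sp 0) := rfl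
    rw [this, hrow, PySem.List.getD_map_range _ _ _ _ (by omega)]
    have e : 0 + t + 1 = t + 1 := by omega
    rw [e]

theorem prefRowsA_getD (f2 : Nat → Nat → Int) (dim : Nat) :
    ∀ (n : Nat) (i : Nat) (prev : List Int),
      (∀ t, t ≤ dim → prev.getD t 0 = Ssum f2 i t) →
      ∀ k j, k < n → j ≤ dim →
        ((prefRowsA f2 dim i prev n).getD k []).getD j 0 = Ssum f2 (i+1+k) j := by
  intro n
  induction n with
  | zero => intro i prev _ k j hk _; omega
  | succ n ih =>
    intro i prev hprev k j hk hj
    match k with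
    | 0 =>
      show (rowA (f2 i) prev dim).getD j 0 = _
      rw [rowA_getD (f2 i) prev (fun t => Ssum f2 i t) dim hprev j hj, Rrow_eq_Ssum]
    | k+1 =>
      show ((prefRowsA f2 dim (i+1) (rowA (f2 i) prev dim) n).getD k []).getD j 0 = _
      have hr : ∀ t, t ≤ dim → (rowA (f2 i) prev dim).getD t 0 = Ssum f2 (i+1) t := by
        intro t ht
        rw [rowA_getD (f2 i) prev (fun t => Ssum f2 i t) dim hprev t ht, Rrow_eq_Ssum]
      rw [ih (i+1) _ hr k j (by omega) hj]
      have e : i + 1 + 1 + k = i + 1 + (k + 1) := by omega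
      rw [e]

theorem prefA_get2 (f2 : Nat → Nat → Int) (dim : Nat) :
    ∀ i j, i ≤ dim → j ≤ dim → get2A (prefA f2 dim) i j = Ssum f2 i j := by
  intro i j hi hj
  match i with
  | 0 =>
    show (List.replicate (dim+1) 0).getD j 0 = _
    rw [List.getD_replicate _ (by omega)]
    simp [Ssum, colS]
  | i+1 =>
    show ((prefRowsA f2 dim 0 (List.replicate (dim+1) 0) dim).getD i []).getD j 0 = _
    rw [prefRowsA_getD f2 dim dim 0 (List.replicate (dim+1) 0)
          (fun t ht => by rw [List.getD_replicate _ (by omega)]; simp [Ssum, colS])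
          i j (by omega) hj]
    have e : 0 + 1 + i = i + 1 := by omega
    rw [e]

-- A's inclusion–exclusion value for window (i, j) is B's column-sum window value
theorem window_eq (f2 : Nat → Nat → Int) (K i j : Nat) :
    Ssum f2 (i+K) (j+K) + Ssum f2 i j - Ssum f2 i (j+K) - Ssum f2 (i+K) j = Wrow f2 K i j := by
  have hW : Wrow f2 K i j = colS (fun a => colS (fun b => f2 (i+a) (j+b)) K) K := by
    rw [Wrow, colS_comm (fun a b => f2 (i+a) (j+b)) K K]
    exact colS_congr _ _ K (fun b _ => rfl)
  simp only [Ssum, colS_add, hW, colS_add_distrib]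
  ring

-- the telescoping slides
theorem Ccol_succ (f2 : Nat → Nat → Int) (K i j : Nat) :
    Ccol f2 K (i+1) j = Ccol f2 K i j + f2 (i+K) j - f2 i j := by
  have h1 : Ccol f2 K (i+1) j = colS (fun a => f2 (i + (a+1)) j) K :=
    colS_congr _ _ K (fun t _ => by congr 1; omega)
  have h2 : colS (fun a => f2 (i + (a+1)) j) K
      = colS (fun a => f2 (i + a) j) K + f2 (i + K) j - f2 (i + 0) j :=
    colS_shift (fun a => f2 (i + a) j) K
  rw [h1, h2]; rfl

theorem Wrow_succ (f2 : Nat → Nat → Int) (K i j : Nat) :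
    Wrow f2 K i (j+1) = Wrow f2 K i j + Ccol f2 K i (j+K) - Ccol f2 K i j := by
  have h1 : Wrow f2 K i (j+1) = colS (fun b => Ccol f2 K i (j + (b+1))) K :=
    colS_congr _ _ K (fun t _ => by congr 1; omega)
  have h2 : colS (fun b => Ccol f2 K i (j + (b+1))) K
      = colS (fun b => Ccol f2 K i (j + b)) K + Ccol f2 K i (j + K) - Ccol f2 K i (j + 0) :=
    colS_shift (fun b => Ccol f2 K i (j + b)) K
  rw [h1, h2]; rfl

theorem foldl_add_colS (h : Nat → Int) (n : Nat) (c : Int) :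
    (List.range n).foldl (fun s j => s + h j) c = c + colS h n := by
  induction n generalizing c with
  | zero => simp [colS]
  | succ n ih => rw [List.range_succ, List.foldl_append]; simp [colS, ih]; ring

-- B's horizontal scan over one row of windows equals the fold of the window values
theorem rowMaxB_spec (f2 : Nat → Nat → Int) (colsum : List Int) (Kn width i : Nat)
    (hK : 1 ≤ Kn) (hw : width = 2*Kn - 1)
    (hcs : ∀ j, j < width → colsum.getD j 0 = Ccol f2 Kn i j) (prev : Option Int) :
    rowMaxB colsum Kn prev
      = (List.range Kn).foldl (fun p j => optMaxB p (Wrow f2 Kn i j)) prev := by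
  have hs0 : (List.range Kn).foldl (fun s j => s + colsum.getD j 0) 0 = Wrow f2 Kn i 0 := by
    rw [foldl_add_colS, Wrow]
    simp only [zero_add]
    exact colS_congr _ _ Kn (fun t ht => by
      rw [hcs t (by omega)])
  have aux : ∀ n, n ≤ Kn - 1 →
      (List.range n).foldl (fun (sp : Int × Option Int) t =>
        let j := t + 1
        let s' := sp.1 + colsum.getD (j + Kn - 1) 0 - colsum.getD (j - 1) 0
        (s', optMaxB sp.2 s'))
        (Wrow f2 Kn i 0, optMaxB prev (Wrow f2 Kn i 0))
      = (Wrow f2 Kn i n,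
         (List.range (n+1)).foldl (fun p j => optMaxB p (Wrow f2 Kn i j)) prev) := by
    intro n hn
    induction n with
    | zero => simp [List.range_succ]
    | succ n ihn =>
      rw [List.range_succ, List.foldl_append, ihn (by omega)]
      have e1 : n + 1 + Kn - 1 = n + Kn := by omega
      have e2 : n + 1 - 1 = n := by omega
      simp only [List.foldl_cons, List.foldl_nil, e1, e2]
      rw [hcs (n + Kn) (by omega), hcs n (by omega)]
      have : Wrow f2 Kn i n + Ccol f2 Kn i (n + Kn) - Ccol f2 Kn i n = Wrow f2 Kn i (n+1) := by
        rw [Wrow_succ]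
      rw [this]
      refine congrArg₂ Prod.mk rfl ?_
      simp [List.range_succ]
  rw [rowMaxB]
  simp only [hs0]
  rw [aux (Kn - 1) le_rfl]
  have e : Kn - 1 + 1 = Kn := by omega
  rw [e]

-- B's per-query scan equals the nested fold of the window values
theorem stepB_fold (f2 : Nat → Nat → Int) (g : PySem.Dict (Int × Int) Int)
    (fr fc : Int) (K : Int) (Kn width : Nat)
    (hKn : K = (Kn : Int)) (hK : 1 ≤ Kn) (hw : width = 2*Kn - 1)
    (hf2 : f2 = fun (a b : Nat) => g.getD (fr + (a : Int), fc + (b : Int)) 0)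
    (cs0 : List Int) (hcs0 : ∀ j, j < width → cs0.getD j 0 = Ccol f2 Kn 0 j) (prev : Option Int) :
    ∀ m, m ≤ Kn →
      (List.range m).foldl (fun (st : List Int × Option Int) i =>
        let colsum := if i = 0 then st.1 else slideColB g fr fc K i st.1 width
        (colsum, rowMaxB colsum Kn st.2)) (cs0, prev)
      = (((List.range m).foldl (fun (st : List Int × Option Int) i =>
          let colsum := if i = 0 then st.1 else slideColB g fr fc K i st.1 width
          (colsum, rowMaxB colsum Kn st.2)) (cs0, prev)).1,
         (List.range m).foldl (fun p i =>
           (List.range Kn).foldl (fun p j => optMaxB p (Wrow f2 Kn i j)) p) prev)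
      ∧ (∀ j, j < width →
          (((List.range m).foldl (fun (st : List Int × Option Int) i =>
            let colsum := if i = 0 then st.1 else slideColB g fr fc K i st.1 width
            (colsum, rowMaxB colsum Kn st.2)) (cs0, prev)).1).getD j 0
          = Ccol f2 Kn (m - 1) j) := by
  intro m
  induction m with
  | zero => intro _; exact ⟨rfl, by simpa using hcs0⟩
  | succ m ih =>
    intro hm
    obtain ⟨ihfold, ihcs⟩ := ih (by omega)
    set F := (List.range m).foldl (fun p i =>
           (List.range Kn).foldl (fun p j => optMaxB p (Wrow f2 Kn i j)) p) prev with hF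
    set CSm := (((List.range m).foldl (fun (st : List Int × Option Int) i =>
          let colsum := if i = 0 then st.1 else slideColB g fr fc K i st.1 width
          (colsum, rowMaxB colsum Kn st.2)) (cs0, prev)).1) with hCSm
    rw [List.range_succ]
    simp only [List.foldl_append]
    rw [ihfold, ← hF]
    have hmsub : m + 1 - 1 = m := by omega
    rw [hmsub]
    by_cases hm0 : m = 0
    · subst hm0
      have hcsm : ∀ j, j < width → CSm.getD j 0 = Ccol f2 Kn 0 j := by
        intro j hj; simpa using ihcs j hj
      constructor
      · simp only [List.foldl_cons, List.foldl_nil, reduceIte]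
        rw [rowMaxB_spec f2 CSm Kn width 0 hK hw hcsm F]
      · intro j hj
        simp only [List.foldl_cons, List.foldl_nil, reduceIte]
        exact hcsm j hj
    · have hcsm' : ∀ j, j < width →
          (slideColB g fr fc K m CSm width).getD j 0 = Ccol f2 Kn m j := by
        intro j hj
        rw [slideColB, PySem.List.getD_map_range _ _ _ _ hj]
        rw [ihcs j hj]
        have hm1 : 1 ≤ m := by omega
        have hca : fr + ((m : Int) + K - 1) = fr + ((m - 1 + Kn : Nat) : Int) := by
          push_cast [hKn]; push_cast [Nat.cast_sub hm1]; ring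
        have hcb : fr + ((m : Int) - 1) = fr + ((m - 1 : Nat) : Int) := by
          push_cast [Nat.cast_sub hm1]; ring
        have hga : g.getD (fr + ((m : Int) + K - 1), fc + (j : Int)) 0 = f2 (m - 1 + Kn) j := by
          rw [hca, hf2]
        have hgb : g.getD (fr + ((m : Int) - 1), fc + (j : Int)) 0 = f2 (m - 1) j := by
          rw [hcb, hf2]
        rw [hga, hgb]
        have hstep := Ccol_succ f2 Kn (m - 1) j
        have hmm : m - 1 + 1 = m := by omega
        rw [hmm] at hstep
        exact hstep.symm
      constructor
      · simp only [List.foldl_cons, List.foldl_nil, if_neg hm0]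
        rw [rowMaxB_spec f2 _ Kn width m hK hw hcsm' F]
      · intro j hj
        simp only [List.foldl_cons, List.foldl_nil, if_neg hm0]
        exact hcsm' j hj

-- the two per-query computations agree
theorem step_eq (K : Int) (hK : 1 ≤ K) (g : PySem.Dict (Int × Int) Int) (r c : Int) (prev : Option Int) :
    stepA K g r c prev = stepB K g r c prev := by
  obtain ⟨Kn, hKcast, hK1⟩ : ∃ Kn : Nat, K = (Kn : Int) ∧ 1 ≤ Kn := ⟨K.toNat, by omega, by omega⟩
  rw [stepA, stepB]
  set fr := r - (K - 1) with hfr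
  set fc := c - (K - 1) with hfc
  have hKn : K.toNat = Kn := by omega
  have hdim : (2*K - 1).toNat = 2*Kn - 1 := by omega
  rw [hKn, hdim]
  set f2 : Nat → Nat → Int := fun (a b : Nat) => g.getD (fr + (a : Int), fc + (b : Int)) 0 with hf2
  set dim : Nat := 2*Kn - 1 with hdimdef
  -- A's side: every window value is the corresponding Wrow
  have hA : (List.range Kn).foldl (fun p i =>
      (List.range Kn).foldl (fun p j =>
        optMaxA p (get2A (prefA f2 dim) (i+Kn) (j+Kn) + get2A (prefA f2 dim) i j
                   - get2A (prefA f2 dim) i (j+Kn) - get2A (prefA f2 dim) (i+Kn) j)) p) prev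
      = (List.range Kn).foldl (fun p i =>
          (List.range Kn).foldl (fun p j => optMaxB p (Wrow f2 Kn i j)) p) prev := by
    apply PySem.List.foldl_congr_mem
    intro acc i hi
    have hiK : i < Kn := List.mem_range.mp hi
    apply PySem.List.foldl_congr_mem
    intro acc' j hj
    have hjK : j < Kn := List.mem_range.mp hj
    have b1 : i + Kn ≤ dim := by omega
    have b2 : j + Kn ≤ dim := by omega
    have b3 : i ≤ dim := by omega
    have b4 : j ≤ dim := by omega
    rw [prefA_get2 f2 dim (i+Kn) (j+Kn) b1 b2, prefA_get2 f2 dim i j b3 b4,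
        prefA_get2 f2 dim i (j+Kn) b3 b2, prefA_get2 f2 dim (i+Kn) j b1 b4,
        window_eq f2 Kn i j]
    rfl
  rw [hA]
  -- B's side via the fold invariant
  have hcs0 : ∀ j, j < dim → (colsum0B g fr fc K dim).getD j 0 = Ccol f2 Kn 0 j := by
    intro j hj
    rw [colsum0B, PySem.List.getD_map_range _ _ _ _ hj]
    rw [hKn, foldl_add_colS]
    simp only [zero_add, Ccol]
    exact colS_congr _ _ Kn (fun t ht => by simp [hf2])
  have hB := congrArg Prod.snd (stepB_fold f2 g fr fc K Kn dim hKcast hK1 hdimdef hf2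
      (colsum0B g fr fc K dim) hcs0 prev Kn le_rfl).1
  exact hB.symm

-- the outer enumerate(arr) loops coincide state for state
theorem solveGo_eq (K : Int) (hK : 1 ≤ K) :
    ∀ (arr : List (Int × Int × Int)) (idx : Nat) (g : PySem.Dict (Int × Int) Int)
      (prev : Option Int) (ans : List Int),
      solveGoA K arr idx g prev ans = solveGoB K arr idx g prev ans := by
  intro arr
  induction arr with
  | nil => intro _ _ _ _; rfl
  | cons hd rest ih =>
    obtain ⟨r, c, v⟩ := hd
    intro idx g prev ans
    simp only [solveGoA, solveGoB, step_eq K hK]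
    exact ih _ _ _ _

-- ===== VERDICT (by name: the statement is the Claim_ definition above) =====
theorem solve_spec : Claim_equal_solve := by
  intro N K Q arr _ hpre
  obtain ⟨hk, _⟩ := hpre
  unfold Spec_solve solve solve_alt
  rcases hk with hk | hk
  · exact solveGo_eq K hk arr 0 _ none _
  · subst hk; rfl
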